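-- pv_equiv track=rewrite | github.com/Harshit-563/AI_DNS | data_engg.py | consecutive_digits
-- ===== SOURCE A (Python) =====
-- def consecutive_digits(domain):
--     """Maximum consecutive digits"""
--     max_consecutive = 0
--     current = 0
--     for c in domain:
--         if c.isdigit():
--             current += 1
--             max_consecutive = max(max_consecutive, current)
--         else:
--             current = 0
--     return max_consecutive
-- ===== SOURCE B (Python) =====
-- def consecutive_digits(domain):
--     """Maximum consecutive digits"""
--     runs = []
--     i, n = 0, len(domain)
--     while i < n:
--         j = i + 1
--         while j < n and domain[j].isdigit() == domain[i].isdigit():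
--             j += 1
--         if domain[i].isdigit():
--             runs.append(j - i)
--         i = j
--     return max(runs, default=0)
-- ===== Notes on version B (the rewrite author's own statement) =====
-- stated objective: alternative
-- what changed: Replaces A's single-pass running-counter/running-max fold with an explicit run-splitting scan (index two-pointer loop that isolates maximal same-isdigit runs, collects digit-run lengths, then takes max with default 0).
import Mathlib
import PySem

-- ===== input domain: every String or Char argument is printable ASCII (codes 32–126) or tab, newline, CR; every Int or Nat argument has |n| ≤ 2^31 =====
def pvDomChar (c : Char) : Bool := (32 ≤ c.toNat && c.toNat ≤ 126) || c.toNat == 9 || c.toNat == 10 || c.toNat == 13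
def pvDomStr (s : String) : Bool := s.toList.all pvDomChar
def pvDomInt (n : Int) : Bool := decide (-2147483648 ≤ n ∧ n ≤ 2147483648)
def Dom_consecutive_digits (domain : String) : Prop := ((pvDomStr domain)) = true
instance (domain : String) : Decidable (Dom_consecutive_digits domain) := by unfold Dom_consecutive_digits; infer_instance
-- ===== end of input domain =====

-- B re-implements the scan as run-splitting (maximal same-predicate runs, then max of
-- digit-run lengths with default 0) instead of A's single running-counter fold; objective: alternative.

-- ===== PORT A =====
def consecutive_digits (domain : String) : Int :=
  (domain.toList.foldl
    (fun (st : Int × Int) c =>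
      if PySem.Chars.isdigit c then (max st.1 (st.2 + 1), st.2 + 1) else (st.1, 0))
    (0, 0)).1

-- ===== PORT B =====
-- Source B's outer while loop: split off the maximal run of chars whose isdigit equals the
-- head's (the inner 'advance j' loop = takeWhile/dropWhile), record its length if digits
def digitRuns : List Char → List Int
  | [] => []
  | c :: cs =>
    let k := PySem.Chars.isdigit c
    let g := cs.takeWhile (fun d => PySem.Chars.isdigit d == k)
    let rest := cs.dropWhile (fun d => PySem.Chars.isdigit d == k)
    if k then ((g.length : Int) + 1) :: digitRuns rest else digitRuns rest
termination_by l => l.length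
decreasing_by
  all_goals
    have := List.length_dropWhile_le (p := fun d => PySem.Chars.isdigit d == PySem.Chars.isdigit c) (l := cs)
    simp only [List.length_cons]
    omega

-- max(runs, default=0)
def consecutive_digits_alt (domain : String) : Int :=
  (PySem.List.max? (digitRuns domain.toList) (fun x => x)).getD 0

-- ===== PRECONDITION & SPEC =====
def Spec_consecutive_digits (domain : String) (out : Int) : Prop := out = consecutive_digits_alt domain
instance (domain : String) (out : Int) : Decidable (Spec_consecutive_digits domain out) := by unfold Spec_consecutive_digits; infer_instance

-- ===== CLAIM (what is proved, stated in full; the proofs are below) =====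
def Claim_equal_consecutive_digits : Prop := ∀ (domain : String), Dom_consecutive_digits domain → Spec_consecutive_digits domain (consecutive_digits domain)

-- ===== LEMMAS AND PROOFS =====

-- A's step, named for the proofs
def stepA (st : Int × Int) (c : Char) : Int × Int :=
  if PySem.Chars.isdigit c then (max st.1 (st.2 + 1), st.2 + 1) else (st.1, 0)

theorem digitRuns_nil : digitRuns [] = [] := by unfold digitRuns; rfl

theorem digitRuns_cons_digit (c : Char) (cs : List Char) (hk : PySem.Chars.isdigit c = true) :
    digitRuns (c :: cs) =
      (((cs.takeWhile (fun d => PySem.Chars.isdigit d == PySem.Chars.isdigit c)).length : Int) + 1)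
        :: digitRuns (cs.dropWhile (fun d => PySem.Chars.isdigit d == PySem.Chars.isdigit c)) := by
  rw [digitRuns.eq_def]; simp [hk]

theorem digitRuns_cons_nondigit (c : Char) (cs : List Char) (hk : PySem.Chars.isdigit c = false) :
    digitRuns (c :: cs) =
      digitRuns (cs.dropWhile (fun d => PySem.Chars.isdigit d == PySem.Chars.isdigit c)) := by
  rw [digitRuns.eq_def]; simp [hk]

-- folding A's step over a block of digits: the counter climbs, the running max ends at cur + len
theorem foldl_stepA_digits (ds : List Char) (h : ∀ c ∈ ds, PySem.Chars.isdigit c = true)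
    (m cur : Int) (hcm : cur ≤ m) :
    ds.foldl stepA (m, cur) = (max m (cur + ds.length), cur + ds.length) := by
  induction ds generalizing m cur with
  | nil => simp [max_eq_left hcm]
  | cons c cs ih =>
    have hc : PySem.Chars.isdigit c = true := h c (by simp)
    simp only [List.foldl_cons, stepA, hc, if_true]
    rw [ih (fun d hd => h d (by simp [hd])) _ _ (le_max_right _ _)]
    simp only [Prod.mk.injEq, List.length_cons]
    push_cast
    constructor
    · simp only [max_def]; split_ifs <;> omega
    · ring

-- folding A's step over a block of non-digits from counter 0 changes nothing
theorem foldl_stepA_nondigits (ds : List Char) (h : ∀ c ∈ ds, PySem.Chars.isdigit c = false)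
    (m : Int) : ds.foldl stepA (m, 0) = (m, 0) := by
  induction ds with
  | nil => rfl
  | cons c cs ih =>
    have hc := h c (by simp)
    simp only [List.foldl_cons, stepA, hc, Bool.false_eq_true, if_false]
    exact ih (fun d hd => h d (by simp [hd])) 

-- main invariant: A's fold from (m, 0) is the running max of m over the digit-run lengths
theorem foldl_stepA_eq_runs (l : List Char) (m : Int) (hm : 0 ≤ m) :
    (l.foldl stepA (m, 0)).1 = (digitRuns l).foldl max m := by
  induction hl : l.length using Nat.strong_induction_on generalizing l m with
  | _ n ih =>
  match l with
  | [] => simp [digitRuns_nil]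
  | c :: cs =>
    have hsplit := (List.takeWhile_append_dropWhile
      (p := fun d => PySem.Chars.isdigit d == PySem.Chars.isdigit c) (l := cs)).symm
    set g := cs.takeWhile (fun d => PySem.Chars.isdigit d == PySem.Chars.isdigit c) with hg
    set rest := cs.dropWhile (fun d => PySem.Chars.isdigit d == PySem.Chars.isdigit c) with hr
    have hlen : rest.length ≤ cs.length := by
      rw [hr]; exact List.length_dropWhile_le _ _
    have hgmem : ∀ d ∈ g, PySem.Chars.isdigit d = PySem.Chars.isdigit c := by
      intro d hd
      have := List.mem_takeWhile_imp (hg ▸ hd)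
      simpa using this
    have hcons : c :: cs = (c :: g) ++ rest := by rw [List.cons_append, ← hsplit]
    by_cases hk : PySem.Chars.isdigit c = true
    · have hfold : (c :: cs).foldl stepA (m, 0)
          = rest.foldl stepA (max m ((g.length : Int) + 1), (g.length : Int) + 1) := by
        conv_lhs => rw [hcons]
        rw [List.foldl_append, foldl_stepA_digits (c :: g)
          (by intro d hd; rcases List.mem_cons.1 hd with h | h
              · subst h; exact hk
              · rw [hgmem d h]; exact hk) m 0 hm]
        simp only [List.length_cons]
        push_cast
        ring_nf
      rw [hfold, digitRuns_cons_digit c cs hk, ← hg, ← hr, List.foldl_cons]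
      rcases hrest : rest with _ | ⟨r, rs⟩
      · simp [digitRuns_nil]
      · have hrne : PySem.Chars.isdigit r = false := by
          have h2 := List.head?_dropWhile_not
            (p := fun d => PySem.Chars.isdigit d == PySem.Chars.isdigit c) (l := cs)
          rw [← hr, hrest] at h2
          simp only [List.head?_cons] at h2
          simpa [hk] using h2
        simp only [List.foldl_cons, stepA, hrne, Bool.false_eq_true, if_false]
        have hstep : (r :: rs).foldl stepA (max m ((g.length : Int) + 1), 0)
            = rs.foldl stepA (max m ((g.length : Int) + 1), 0) := by
          simp [stepA, hrne]
        rw [← hstep]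
        have hlt : (r :: rs).length < n := by
          rw [← hl]
          have : (r :: rs).length = rest.length := by rw [hrest]
          simp only [List.length_cons] at this ⊢
          omega
        exact ih (r :: rs).length hlt (r :: rs) (max m ((g.length : Int) + 1))
          (le_trans hm (le_max_left _ _)) rfl
    · have hk' : PySem.Chars.isdigit c = false := by simpa using hk
      have hfold : (c :: cs).foldl stepA (m, 0) = rest.foldl stepA (m, 0) := by
        conv_lhs => rw [hcons]
        rw [List.foldl_append, foldl_stepA_nondigits (c :: g)
          (by intro d hd; rcases List.mem_cons.1 hd with h | h
              · subst h; exact hk'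
              · rw [hgmem d h]; exact hk') m]
      rw [hfold, digitRuns_cons_nondigit c cs hk', ← hr]
      rcases hrest : rest with _ | ⟨r, rs⟩
      · simp [digitRuns_nil]
      · have hlt : (r :: rs).length < n := by
          rw [← hl]
          have : (r :: rs).length = rest.length := by rw [hrest]
          simp only [List.length_cons] at this ⊢
          omega
        exact ih (r :: rs).length hlt (r :: rs) m hm rfl

-- every recorded run length is at least 1
theorem digitRuns_pos (l : List Char) : ∀ x ∈ digitRuns l, 1 ≤ x := by
  induction hl : l.length using Nat.strong_induction_on generalizing l with
  | _ n ih =>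
  match l with
  | [] => simp [digitRuns_nil]
  | c :: cs =>
    set rest := cs.dropWhile (fun d => PySem.Chars.isdigit d == PySem.Chars.isdigit c) with hr
    have hlen : rest.length < n := by
      rw [← hl]
      have h1 : rest.length ≤ cs.length := by
        rw [hr]; exact List.length_dropWhile_le _ _
      simp only [List.length_cons]; omega
    intro x hx
    by_cases hk : PySem.Chars.isdigit c = true
    · rw [digitRuns_cons_digit c cs hk, ← hr] at hx
      rcases List.mem_cons.1 hx with h | h
      · subst h; omega
      · exact ih rest.length hlen rest rfl x h
    · rw [digitRuns_cons_nondigit c cs (by simpa using hk), ← hr] at hx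
      exact ih rest.length hlen rest rfl x hx

-- max(runs, default=0) equals the running-max fold from 0 when every run is ≥ 1
theorem maxD_eq_foldl (runs : List Int) (h : ∀ x ∈ runs, 1 ≤ x) :
    (PySem.List.max? runs (fun x => x)).getD 0 = runs.foldl max 0 := by
  match runs with
  | [] => rfl
  | x :: t =>
    rw [PySem.List.max?_id_cons]
    simp only [Option.getD_some, List.foldl_cons]
    rw [max_eq_right (le_trans (by norm_num) (h x (by simp)))]

-- ===== VERDICT (by name: the statement is the Claim_ definition above) =====
theorem consecutive_digits_spec : Claim_equal_consecutive_digits := by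
  intro domain _
  unfold Spec_consecutive_digits consecutive_digits consecutive_digits_alt
  rw [show (fun (st : Int × Int) c =>
      if PySem.Chars.isdigit c then (max st.1 (st.2 + 1), st.2 + 1) else (st.1, 0)) = stepA from rfl]
  rw [foldl_stepA_eq_runs domain.toList 0 le_rfl,
      maxD_eq_foldl _ (digitRuns_pos domain.toList)]
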